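-- pv_equiv track=rewrite | github.com/leihchen/leetcode | mac/main.py | cohesiveProcess
-- ===== SOURCE A (Python) =====
-- from collections import Counter, defaultdict, deque
-- import math
--
-- def cohesiveProcess(nums):
--     cnt = Counter(nums)
--     res = 0
--     for k, v in cnt.items():
--         res += k
--         cohesive = k
--         for _ in range(v - 1):
--             cohesive = math.ceil(cohesive / 2)
--             res += cohesive
--     return res
-- ===== SOURCE B (Python) =====
-- from collections import Counter
--
-- def cohesiveProcess(nums):
--     # Closed form per distinct value: the i-th repeated ceil-halving of k is
--     # ceil(k/2^i), and sum_{i<m} floor(K/2^i) = 2K - 2*(K>>m) - popcount(K mod 2^m),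
--     # so each distinct value contributes in O(1) big-int operations
--     res = 0
--     for k, v in Counter(nums).items():
--         if k > 0:
--             K = k - 1  # ceil(k/2^i) = floor((k-1)/2^i) + 1
--             m = min(v, K.bit_length())
--             res += 2 * K - 2 * (K >> m) - bin(K & ((1 << m) - 1)).count('1') + v
--         else:
--             K = -k     # ceil(k/2^i) = -floor(-k/2^i)
--             m = min(v, K.bit_length())
--             res -= 2 * K - 2 * (K >> m) - bin(K & ((1 << m) - 1)).count('1')
--     return res
-- ===== Notes on version B (the rewrite author's own statement) =====
-- stated objective: alternative
-- what changed: B replaces A's per-occurrence halving loop by a closed form per distinct value: the i-th repeated ceil-halving of k is ceil(k/2^i), and sum_{i<m} floor(K/2^i) = 2K - 2*(K>>m) - popcount(K mod 2^m), so each distinct value contributes O(1) arithmetic/bit operations instead of O(count) iterations; this changes the asymptotics in the counts but is not measurably faster on low-duplicate inputs.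
import Mathlib
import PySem

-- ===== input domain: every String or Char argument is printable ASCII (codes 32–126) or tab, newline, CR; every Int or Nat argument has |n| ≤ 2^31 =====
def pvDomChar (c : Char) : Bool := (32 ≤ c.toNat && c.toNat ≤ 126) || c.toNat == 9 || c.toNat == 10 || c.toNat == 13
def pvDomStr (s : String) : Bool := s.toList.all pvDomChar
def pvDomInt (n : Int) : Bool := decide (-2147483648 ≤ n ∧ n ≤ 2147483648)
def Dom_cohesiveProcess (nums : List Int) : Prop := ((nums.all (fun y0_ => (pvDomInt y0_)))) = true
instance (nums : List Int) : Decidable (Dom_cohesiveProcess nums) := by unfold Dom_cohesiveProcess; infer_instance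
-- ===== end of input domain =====

-- B replaces A's per-occurrence halving loop by a closed form (bit-counting identity) per distinct value.

-- ===== PORT A =====
-- math.ceil(c/2) is exact for |c| ≤ 2^31 (floats are exact below 2^53); ceil(c/2) = -((-c)//2).
def cohesiveProcess (nums : List Int) : Int :=
  let cnt := PySem.Dict.counter nums
  cnt.items.foldl (fun res kv =>
    let res := res + kv.1
    ((PySem.List.pyRange 0 (kv.2 - 1) 1).foldl
      (fun (p : Int × Int) _ =>
        let c := -(PySem.Int.floordiv (-(p.2)) 2)
        (p.1 + c, c)) (res, kv.1)).1) 0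

-- ===== PORT B =====
-- K >> m = K // 2^m and K & ((1<<m)-1) = K % 2^m (K ≥ 0 here); bin(x).count('1') = PySem.Int.bitCount,
-- K.bit_length() = PySem.Int.bitLength.
def cohesiveProcess_alt (nums : List Int) : Int :=
  (PySem.Dict.counter nums).items.foldl (fun res kv =>
    let k := kv.1
    let v := kv.2
    if k > 0 then
      let K := k - 1
      let m := min v ((PySem.Int.bitLength K : Int))
      res + (2 * K - 2 * PySem.Int.floordiv K (2 ^ m.toNat)
             - (PySem.Int.bitCount (PySem.Int.mod K (2 ^ m.toNat)) : Int) + v)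
    else
      let K := -k
      let m := min v ((PySem.Int.bitLength K : Int))
      res - (2 * K - 2 * PySem.Int.floordiv K (2 ^ m.toNat)
             - (PySem.Int.bitCount (PySem.Int.mod K (2 ^ m.toNat)) : Int))) 0

-- ===== PRECONDITION & SPEC =====
def Spec_cohesiveProcess (nums : List Int) (out : Int) : Prop := out = cohesiveProcess_alt nums
instance (nums : List Int) (out : Int) : Decidable (Spec_cohesiveProcess nums out) := by unfold Spec_cohesiveProcess; infer_instance

-- ===== CLAIM (what is proved, stated in full; the proofs are below) =====
def Claim_equal_cohesiveProcess : Prop := ∀ (nums : List Int), Dom_cohesiveProcess nums → Spec_cohesiveProcess nums (cohesiveProcess nums)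

-- ===== LEMMAS AND PROOFS =====

-- the ceil-halving step, written once
def pvHalf (x : Int) : Int := PySem.Int.floordiv (x + 1) 2

theorem pvHalf_eq_ceil (x : Int) : -(PySem.Int.floordiv (-x) 2) = pvHalf x := by
  unfold pvHalf
  rw [PySem.Int.floordiv_eq_ediv_of_pos (by norm_num : (0:Int) < 2),
      PySem.Int.floordiv_eq_ediv_of_pos (by norm_num : (0:Int) < 2)]
  omega

-- sum of the first n terms of the halving sequence starting at x
def pvSumIter (x : Int) : Nat → Int
  | 0 => 0
  | n+1 => x + pvSumIter (pvHalf x) n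

-- Nat-level machinery for B's closed form
def pvPc : Nat → Nat
  | 0 => 0
  | n+1 => (n+1) % 2 + pvPc ((n+1) / 2)
decreasing_by exact Nat.div_lt_self (Nat.succ_pos n) (by norm_num)

def pvBl : Nat → Nat
  | 0 => 0
  | n+1 => pvBl ((n+1) / 2) + 1
decreasing_by exact Nat.div_lt_self (Nat.succ_pos n) (by norm_num)

theorem pvPc_unfold (n : Nat) : pvPc n = n % 2 + pvPc (n / 2) := by
  cases n with
  | zero => simp [pvPc]
  | succ m => rw [pvPc]

theorem pvPc_two_mul_add (a b : Nat) (hb : b < 2) : pvPc (2 * a + b) = b + pvPc a := by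
  rw [pvPc_unfold]
  have h1 : (2 * a + b) % 2 = b := by omega
  have h2 : (2 * a + b) / 2 = a := by omega
  rw [h1, h2]

theorem pvLt_two_pow_bl (K : Nat) : K < 2 ^ pvBl K := by
  induction K using Nat.strong_induction_on with
  | _ K ih =>
    cases K with
    | zero => simp [pvBl]
    | succ n =>
      rw [pvBl]
      have h := ih ((n+1)/2) (Nat.div_lt_self (Nat.succ_pos n) (by norm_num))
      have : 2 ^ (pvBl ((n+1)/2) + 1) = 2 * 2 ^ pvBl ((n+1)/2) := by ring
      omega

def pvNsum : Nat → Nat → Nat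
  | _, 0 => 0
  | K, m+1 => K + pvNsum (K / 2) m

theorem pvNsum_closed (m : Nat) : ∀ K : Nat,
    pvNsum K m + 2 * (K / 2 ^ m) + pvPc (K % 2 ^ m) = 2 * K := by
  induction m with
  | zero => intro K; simp [pvNsum, Nat.mod_one, pvPc]
  | succ m ih =>
    intro K
    have ihK := ih (K / 2)
    have hdiv : K / 2 / 2 ^ m = K / 2 ^ (m+1) := by
      rw [Nat.div_div_eq_div_mul, pow_succ, mul_comm]
    have hmod : K % 2 ^ (m+1) = 2 * (K / 2 % 2 ^ m) + K % 2 := by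
      have := Nat.mod_mul (a := 2) (b := 2 ^ m) (x := K)
      rw [pow_succ, mul_comm]
      omega
    have hpc : pvPc (K % 2 ^ (m+1)) = K % 2 + pvPc (K / 2 % 2 ^ m) := by
      rw [hmod, pvPc_two_mul_add _ _ (Nat.mod_lt K (by norm_num))]
    rw [pvNsum, hpc]
    rw [hdiv] at ihK
    omega

theorem pvNsum_zero_left (m : Nat) : pvNsum 0 m = 0 := by
  induction m with
  | zero => rfl
  | succ m ih => rw [pvNsum]; simpa using ih

theorem pvNsum_split (a : Nat) : ∀ (K b : Nat),
    pvNsum K (a + b) = pvNsum K a + pvNsum (K / 2 ^ a) b := by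
  induction a with
  | zero => intro K b; simp [pvNsum]
  | succ a ih =>
    intro K b
    have h : a + 1 + b = (a + b) + 1 := by omega
    rw [h, pvNsum, pvNsum, ih (K/2) b, Nat.div_div_eq_div_mul, pow_succ, mul_comm]
    ring

theorem pvNsum_trunc (K n : Nat) (h : pvBl K ≤ n) : pvNsum K n = pvNsum K (pvBl K) := by
  obtain ⟨j, rfl⟩ := Nat.exists_eq_add_of_le h
  rw [pvNsum_split, Nat.div_eq_of_lt (pvLt_two_pow_bl K), pvNsum_zero_left]
  omega

-- nsum at an arbitrary n equals the closed form evaluated at m = min n (bl K)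
theorem pvNsum_min (K n : Nat) :
    pvNsum K n + 2 * (K / 2 ^ (min n (pvBl K))) + pvPc (K % 2 ^ (min n (pvBl K))) = 2 * K := by
  rcases le_total n (pvBl K) with h | h
  · rw [min_eq_left h]; exact pvNsum_closed n K
  · rw [min_eq_right h, pvNsum_trunc K n h]; exact pvNsum_closed (pvBl K) K

-- bridge my Nat pc / bl to PySem's bitCount / bitLength
theorem pvBl_eq (K : Nat) : PySem.Int.bitLength (K : Int) = pvBl K := by
  induction K using Nat.strong_induction_on with
  | _ K ih =>
    cases K with
    | zero => simp [PySem.Int.bitLength_zero, pvBl]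
    | succ n =>
      rw [PySem.Int.bitLength_natCast (Nat.succ_pos n), pvBl,
          ih ((n+1)/2) (Nat.div_lt_self (Nat.succ_pos n) (by norm_num))]

theorem pvPc_eq (K : Nat) : PySem.Int.bitCount (K : Int) = pvPc K := by
  induction K using Nat.strong_induction_on with
  | _ K ih =>
    cases K with
    | zero => simp [PySem.Int.bitCount_zero, pvPc]
    | succ n =>
      rw [PySem.Int.bitCount_natCast (Nat.succ_pos n), pvPc,
          ih ((n+1)/2) (Nat.div_lt_self (Nat.succ_pos n) (by norm_num))]

-- pvSumIter in terms of pvNsum, positive start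
theorem pvSumIter_pos (n : Nat) : ∀ K : Nat,
    pvSumIter ((K : Int) + 1) n = (pvNsum K n : Int) + n := by
  induction n with
  | zero => intro K; simp [pvSumIter, pvNsum]
  | succ n ih =>
    intro K
    have hhalf : pvHalf ((K : Int) + 1) = ((K / 2 : Nat) : Int) + 1 := by
      unfold pvHalf
      have : (K : Int) + 1 + 1 = ((K + 2 : Nat) : Int) := by push_cast; ring
      rw [this]
      rw [show ((2:Int)) = ((2:Nat):Int) from rfl, PySem.Int.floordiv_natCast]
      have : (K + 2) / 2 = K / 2 + 1 := by omega
      rw [this]; push_cast; ring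
    rw [pvSumIter, hhalf, ih (K / 2), pvNsum]
    push_cast; ring

-- pvSumIter in terms of pvNsum, nonpositive start
theorem pvSumIter_neg (n : Nat) : ∀ K : Nat,
    pvSumIter (-(K : Int)) n = -(pvNsum K n : Int) := by
  induction n with
  | zero => intro K; simp [pvSumIter, pvNsum]
  | succ n ih =>
    intro K
    have hhalf : pvHalf (-(K : Int)) = -((K / 2 : Nat) : Int) := by
      unfold pvHalf
      rw [PySem.Int.floordiv_eq_ediv_of_pos (by norm_num : (0:Int) < 2)]
      omega
    rw [pvSumIter, hhalf, ih (K / 2), pvNsum]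
    push_cast; ring

-- B's per-value contribution equals the iterated halving sum (v ≥ 0)
theorem pvItem_eq (k v : Int) (hv : 0 ≤ v) :
    (if k > 0 then
      2 * (k - 1) - 2 * PySem.Int.floordiv (k - 1) (2 ^ (min v ((PySem.Int.bitLength (k-1) : Int))).toNat)
        - (PySem.Int.bitCount (PySem.Int.mod (k - 1) (2 ^ (min v ((PySem.Int.bitLength (k-1) : Int))).toNat)) : Int) + v
     else
      -(2 * (-k) - 2 * PySem.Int.floordiv (-k) (2 ^ (min v ((PySem.Int.bitLength (-k) : Int))).toNat)
        - (PySem.Int.bitCount (PySem.Int.mod (-k) (2 ^ (min v ((PySem.Int.bitLength (-k) : Int))).toNat)) : Int)))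
    = pvSumIter k v.toNat := by
  by_cases hk : k > 0
  · rw [if_pos hk]
    obtain ⟨K, hK⟩ : ∃ K : Nat, k - 1 = (K : Int) := ⟨(k-1).toNat, by omega⟩
    have hkK : k = (K : Int) + 1 := by omega
    have hmin : (min v ((pvBl K : Int))).toNat = min v.toNat (pvBl K) := by omega
    rw [hK, pvBl_eq, hmin]
    rw [show ((2:Int) ^ min v.toNat (pvBl K)) = ((2 ^ min v.toNat (pvBl K) : Nat) : Int) by push_cast; ring]
    rw [PySem.Int.floordiv_natCast, PySem.Int.mod_natCast, pvPc_eq]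
    rw [hkK, pvSumIter_pos v.toNat K]
    have h := pvNsum_min K v.toNat
    omega
  · rw [if_neg hk]
    obtain ⟨K, hK⟩ : ∃ K : Nat, -k = (K : Int) := ⟨(-k).toNat, by omega⟩
    have hkK : k = -(K : Int) := by omega
    have hmin : (min v ((pvBl K : Int))).toNat = min v.toNat (pvBl K) := by omega
    rw [hK, pvBl_eq, hmin]
    rw [show ((2:Int) ^ min v.toNat (pvBl K)) = ((2 ^ min v.toNat (pvBl K) : Nat) : Int) by push_cast; ring]
    rw [PySem.Int.floordiv_natCast, PySem.Int.mod_natCast, pvPc_eq]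
    rw [hkK, pvSumIter_neg v.toNat K]
    have h := pvNsum_min K v.toNat
    omega

-- A's inner fold computes the tail of the halving sum
theorem pvInnerFold_eq (l : List Int) : ∀ res x : Int,
    (l.foldl (fun (p : Int × Int) _ =>
        let c := -(PySem.Int.floordiv (-(p.2)) 2)
        (p.1 + c, c)) (res, x)).1 = res + pvSumIter (pvHalf x) l.length := by
  induction l with
  | nil => intro res x; simp [pvSumIter]
  | cons a t ih =>
    intro res x
    simp only [List.foldl_cons, List.length_cons]
    rw [pvHalf_eq_ceil, ih]
    simp [pvSumIter]
    ring

-- A's per-value step: k plus the inner fold over range(v-1) is the v-term halving sum (v ≥ 1)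
theorem pvStep_eq (res k v : Int) (hv : 1 ≤ v) :
    ((PySem.List.pyRange 0 (v - 1) 1).foldl
      (fun (p : Int × Int) _ =>
        let c := -(PySem.Int.floordiv (-(p.2)) 2)
        (p.1 + c, c)) (res + k, k)).1 = res + pvSumIter k v.toNat := by
  rw [pvInnerFold_eq, PySem.List.length_pyRange_one]
  have hn : v.toNat = (v - 1 - 0).toNat + 1 := by omega
  rw [hn, pvSumIter]
  ring

-- ===== VERDICT (by name: the statement is the Claim_ definition above) =====
theorem cohesiveProcess_spec : Claim_equal_cohesiveProcess := by
  intro nums _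
  unfold Spec_cohesiveProcess cohesiveProcess cohesiveProcess_alt
  apply PySem.List.foldl_congr_mem
  intro acc kv hkv
  rw [PySem.Dict.items_counter] at hkv
  obtain ⟨j, hj, rfl⟩ := List.mem_map.1 hkv
  have hmem : j ∈ nums := (PySem.Set.mem_ofList _ _).1 hj
  have hv : (1 : Int) ≤ (nums.count j : Int) := by
    exact_mod_cast List.count_pos_iff.2 hmem
  simp only
  rw [pvStep_eq acc j (nums.count j) hv, ← pvItem_eq j (nums.count j) (by omega)]
  by_cases hk : j > 0
  · rw [if_pos hk, if_pos hk]
  · rw [if_neg hk, if_neg hk]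
    ring
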